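-- pv_equiv track=rewrite | github.com/ghromis/CodingTheMatrix | Politics Lab/politics_lab.py | least_similar
-- ===== SOURCE A (Python) =====
-- def policy_compare(sen_a, sen_b, voting_dict):
--     """
--     Input: last names of sen_a and sen_b, and a voting dictionary mapping senator
--            names to lists representing their voting records.
--     Output: the dot-product (as a number) representing the degree of similarity
--             between two senators' voting policies
--     Example:
--         >>> voting_dict = {'Fox-Epstein':[-1,-1,-1,1],'Ravella':[1,1,1,1]}
--         >>> policy_compare('Fox-Epstein','Ravella', voting_dict)
--         -2
--     """
--     return sum([a*b for (a,b) in zip(voting_dict[sen_a], voting_dict[sen_b])])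
--
-- def least_similar(sen, voting_dict):
--     """
--     Input: the last name of a senator, and a dictionary mapping senator names
--            to lists representing their voting records.
--     Output: the last name of the senator whose political mindset is least like the input
--             senator.
--     Example:
--         >>> vd = {'Klein': [1,1,1], 'Fox-Epstein': [1,-1,0], 'Ravella': [-1,0,0]}
--         >>> least_similar('Klein', vd)
--         'Ravella'
--     """
--     result = 1000000
--     least_s = set()
--     for k in voting_dict.keys():
--         if k != sen:
--             new_result = policy_compare(sen, k, voting_dict)
--             if new_result < result:
--                 result = new_result
--                 least_s = (k, result)
--     return least_s[0]
-- ===== SOURCE B (Python) =====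
-- def least_similar(sen, voting_dict):
--     mine = voting_dict[sen]
--     scores = [(sum(a * b for a, b in zip(mine, votes)), name)
--               for name, votes in voting_dict.items() if name != sen]
--     scores.sort(key=lambda p: p[0])
--     return scores[0][1]
-- ===== Notes on version B (the rewrite author's own statement) =====
-- stated objective: alternative
-- what changed: Replaces A's running-minimum scan with a 1000000 sentinel by building the full (score, name) list, stably sorting it ascending by score alone, and returning the first name; ties still resolve to the earliest senator because the sort is stable and keyed on score only.
import Mathlib
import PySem

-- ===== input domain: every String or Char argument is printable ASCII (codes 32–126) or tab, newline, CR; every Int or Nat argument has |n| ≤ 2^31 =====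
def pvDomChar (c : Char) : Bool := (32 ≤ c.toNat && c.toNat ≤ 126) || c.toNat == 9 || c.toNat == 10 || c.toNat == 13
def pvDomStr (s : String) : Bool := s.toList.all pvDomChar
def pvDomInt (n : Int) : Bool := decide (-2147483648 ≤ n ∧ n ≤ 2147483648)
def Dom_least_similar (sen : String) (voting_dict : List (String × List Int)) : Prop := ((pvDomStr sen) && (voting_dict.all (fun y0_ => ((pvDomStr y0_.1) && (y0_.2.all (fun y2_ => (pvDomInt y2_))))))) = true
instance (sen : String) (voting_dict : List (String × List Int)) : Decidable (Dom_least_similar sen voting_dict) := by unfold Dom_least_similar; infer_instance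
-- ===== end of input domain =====

-- B replaces A's running-minimum scan (with its 1000000 sentinel) by building all (score, name)
-- pairs and stably sorting them by score alone; an alternative decomposition, not claimed faster.

-- shared helpers: dot product of two voting records, and first-match dict lookup (default [])
def pvDot (xs ys : List Int) : Int := ((xs.zip ys).map (fun q => q.1 * q.2)).sum
def pvRow (voting_dict : List (String × List Int)) (k : String) : List Int :=
  ((voting_dict.find? (fun q => q.1 == k)).map Prod.snd).getD []

-- ===== PORT A =====
def policy_compare (sen_a sen_b : String) (voting_dict : List (String × List Int)) : Int :=
  pvDot (pvRow voting_dict sen_a) (pvRow voting_dict sen_b)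

-- the body of A's "for k in voting_dict.keys()" loop, acting on the state (result, least_s)
def pvStepA (sen : String) (voting_dict : List (String × List Int))
    (st : Int × Option (String × Int)) (kv : String × List Int) : Int × Option (String × Int) :=
  if kv.1 ≠ sen then
    let new_result := policy_compare sen kv.1 voting_dict
    if new_result < st.1 then (new_result, some (kv.1, new_result)) else st
  else st

def least_similar (sen : String) (voting_dict : List (String × List Int)) : String :=
  let fin := voting_dict.foldl (pvStepA sen voting_dict) (1000000, none)
  match fin.2 with
  | some p => p.1
  | none => ""   -- Python raises TypeError on least_s[0] here; excluded by Pre_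

-- ===== PORT B =====
def least_similar_alt (sen : String) (voting_dict : List (String × List Int)) : String :=
  let mine := pvRow voting_dict sen
  let scores := (voting_dict.filter (fun p => p.1 ≠ sen)).map (fun p => (pvDot mine p.2, p.1))
  match PySem.List.sorted scores (fun t => t.1) false with
  | t :: _ => t.2
  | [] => ""   -- Python raises IndexError on scores[0] here; excluded by Pre_

-- ===== PRECONDITION & SPEC =====
-- Pre_ excludes the inputs where A raises (KeyError when sen is not a key; TypeError on set()[0]
-- when there is no other senator or every other senator's dot-product with sen is ≥ 1000000), and
-- association lists with duplicate senator names, which do not represent a Python dict.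
def Pre_least_similar (sen : String) (voting_dict : List (String × List Int)) : Prop :=
  (voting_dict.map Prod.fst).Nodup ∧ sen ∈ voting_dict.map Prod.fst ∧
  ∃ p ∈ voting_dict, p.1 ≠ sen ∧ pvDot (pvRow voting_dict sen) p.2 < 1000000
instance (sen : String) (voting_dict : List (String × List Int)) : Decidable (Pre_least_similar sen voting_dict) := by unfold Pre_least_similar; infer_instance

def pvWitness_least_similar : String × (List (String × List Int)) :=
  ("Klein", [("Klein", [1, 1, 1]), ("Fox-Epstein", [1, -1, 0]), ("Ravella", [-1, 0, 0])])

def Spec_least_similar (sen : String) (voting_dict : List (String × List Int)) (out : String) : Prop := out = least_similar_alt sen voting_dict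
instance (sen : String) (voting_dict : List (String × List Int)) (out : String) : Decidable (Spec_least_similar sen voting_dict out) := by unfold Spec_least_similar; infer_instance

-- ===== CLAIM (what is proved, stated in full; the proofs are below) =====
def Claim_equal_least_similar : Prop := ∀ (sen : String) (voting_dict : List (String × List Int)), Dom_least_similar sen voting_dict → Pre_least_similar sen voting_dict → Spec_least_similar sen voting_dict (least_similar sen voting_dict)


-- ===== LEMMAS AND PROOFS =====

-- first element of the list attaining the minimal score (ties keep the earlier element)
def pvFirstMin : List (Int × String) → Option (Int × String)
  | [] => none
  | t :: l =>
    match pvFirstMin l with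
    | none => some t
    | some u => some (if u.1 < t.1 then u else t)

-- the strict-running-minimum step A's loop performs, on score/name pairs
def pvStepS (st : Int × Option (String × Int)) (t : Int × String) : Int × Option (String × Int) :=
  if t.1 < st.1 then (t.1, some (t.2, t.1)) else st

theorem pvFirstMin_eq_none_iff (L : List (Int × String)) : pvFirstMin L = none ↔ L = [] := by
  cases L with
  | nil => simp [pvFirstMin]
  | cons t l => simp only [pvFirstMin]; cases pvFirstMin l <;> simp

theorem pvFirstMin_le (L : List (Int × String)) (u : Int × String) (h : pvFirstMin L = some u) :
    ∀ t ∈ L, u.1 ≤ t.1 := by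
  induction L generalizing u with
  | nil => simp [pvFirstMin] at h
  | cons a l ih =>
    intro t ht
    simp only [pvFirstMin] at h
    cases hfm : pvFirstMin l with
    | none =>
      rw [hfm] at h
      obtain rfl : a = u := by simpa using h
      have hl : l = [] := (pvFirstMin_eq_none_iff l).mp hfm
      subst hl
      obtain rfl : t = a := by simpa using ht
      exact le_refl _
    | some v =>
      rw [hfm] at h
      obtain rfl : (if v.1 < a.1 then v else a) = u := by simpa using h
      rcases List.mem_cons.mp ht with rfl | htl
      · split <;> omega
      · have hv := ih v hfm t htl
        split <;> omega

theorem pvFirstMin_append (xs : List (Int × String)) (x : Int × String) :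
    pvFirstMin (xs ++ [x]) =
      some (match pvFirstMin xs with | none => x | some u => if x.1 < u.1 then x else u) := by
  induction xs with
  | nil => simp [pvFirstMin]
  | cons t l ih =>
    simp only [List.cons_append, pvFirstMin, ih]
    cases hfm : pvFirstMin l with
    | none => simp
    | some u =>
      simp only
      split_ifs <;> first | rfl | omega

theorem pvHead_insertBy (x : Int × String) (acc : List (Int × String)) :
    (PySem.List.insertBy (fun a b : Int × String => decide (a.1 < b.1)) x acc).head? =
      some (match acc.head? with | none => x | some a => if x.1 < a.1 then x else a) := by
  cases acc with
  | nil => simp [PySem.List.insertBy]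
  | cons a l =>
    by_cases h : x.1 < a.1 <;> simp [PySem.List.insertBy, h]

theorem pvHead_sorted (L : List (Int × String)) :
    (PySem.List.sorted L (fun t => t.1) false).head? = pvFirstMin L := by
  rw [PySem.List.sorted_eq_foldl_insertBy]
  induction L using List.reverseRecOn with
  | nil => rfl
  | append_singleton xs x ih =>
    rw [List.foldl_append, List.foldl_cons, List.foldl_nil, pvHead_insertBy, pvFirstMin_append, ih]

theorem pvFoldS_char (L : List (Int × String)) (r : Int) (acc : Option (String × Int)) :
    L.foldl pvStepS (r, acc) =
      match pvFirstMin L with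
      | none => (r, acc)
      | some u => if u.1 < r then (u.1, some (u.2, u.1)) else (r, acc) := by
  induction L generalizing r acc with
  | nil => rfl
  | cons t l ih =>
    simp only [List.foldl_cons, pvFirstMin]
    by_cases ht : t.1 < r
    · rw [show pvStepS (r, acc) t = (t.1, some (t.2, t.1)) by unfold pvStepS; simp [ht]]
      rw [ih]
      cases hfm : pvFirstMin l with
      | none => simp [ht]
      | some u =>
        simp only
        split_ifs <;> first | rfl | omega
    · rw [show pvStepS (r, acc) t = (r, acc) by unfold pvStepS; simp [ht]]
      rw [ih]
      cases hfm : pvFirstMin l with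
      | none => simp [ht]
      | some u =>
        simp only
        split_ifs <;> first | rfl | omega

theorem pvFind_eq_of_nodup (vd : List (String × List Int))
    (h : (vd.map Prod.fst).Nodup) (p : String × List Int) (hp : p ∈ vd) :
    vd.find? (fun q => q.1 == p.1) = some p := by
  induction vd with
  | nil => simp at hp
  | cons q l ih =>
    rw [List.map_cons, List.nodup_cons] at h
    rcases List.mem_cons.mp hp with rfl | hpl
    · simp [List.find?]
    · have hq : (q.1 == p.1) = false := by
        refine beq_eq_false_iff_ne.mpr ?_
        intro he
        exact h.1 (he ▸ List.mem_map.mpr ⟨p, hpl, rfl⟩)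
      rw [List.find?, hq]
      exact ih h.2 hpl

theorem pvStepA_eq (sen : String) (vd : List (String × List Int))
    (st : Int × Option (String × Int)) (kv : String × List Int)
    (hne : kv.1 ≠ sen) (hrow : pvRow vd kv.1 = kv.2) :
    pvStepA sen vd st kv = pvStepS st (pvDot (pvRow vd sen) kv.2, kv.1) := by
  unfold pvStepA pvStepS policy_compare
  rw [if_pos hne, hrow]

theorem pvStepA_skip (sen : String) (vd : List (String × List Int))
    (st : Int × Option (String × Int)) (kv : String × List Int) (hne : ¬ kv.1 ≠ sen) :
    pvStepA sen vd st kv = st := by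
  unfold pvStepA
  rw [if_neg hne]

theorem pvFoldA_eq (sen : String) (vd vd' : List (String × List Int))
    (st : Int × Option (String × Int)) (h : ∀ p ∈ vd', pvRow vd p.1 = p.2) :
    vd'.foldl (pvStepA sen vd) st =
      ((vd'.filter (fun p => p.1 ≠ sen)).map (fun p => (pvDot (pvRow vd sen) p.2, p.1))).foldl
        pvStepS st := by
  induction vd' generalizing st with
  | nil => rfl
  | cons kv l ih =>
    have hkv := h kv (List.mem_cons_self ..)
    have hl : ∀ p ∈ l, pvRow vd p.1 = p.2 := fun p hp => h p (List.mem_cons_of_mem _ hp)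
    by_cases hne : kv.1 ≠ sen
    · rw [List.foldl_cons, pvStepA_eq sen vd st kv hne hkv, List.filter_cons,
        if_pos (by simpa using hne), List.map_cons, List.foldl_cons]
      exact ih _ hl
    · rw [List.foldl_cons, pvStepA_skip sen vd st kv hne, List.filter_cons,
        if_neg (by simpa using hne)]
      exact ih _ hl

-- ===== VERDICT (by name: the statement is the Claim_ definition above) =====
theorem least_similar_spec : Claim_equal_least_similar := by
  intro sen vd _ hpre
  obtain ⟨hnodup, _, p, hp, hpne, hplt⟩ := hpre
  unfold Spec_least_similar least_similar least_similar_alt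
  have hrow : ∀ q ∈ vd, pvRow vd q.1 = q.2 := by
    intro q hq
    simp [pvRow, pvFind_eq_of_nodup vd hnodup q hq]
  rw [pvFoldA_eq sen vd vd _ hrow]
  set scores := (vd.filter (fun p => p.1 ≠ sen)).map (fun p => (pvDot (pvRow vd sen) p.2, p.1))
    with hscores
  have hmem : (pvDot (pvRow vd sen) p.2, p.1) ∈ scores := by
    rw [hscores]
    exact List.mem_map.mpr ⟨p, List.mem_filter.mpr ⟨hp, by simpa using hpne⟩, rfl⟩
  cases hfm : pvFirstMin scores with
  | none =>
    rw [pvFirstMin_eq_none_iff] at hfm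
    rw [hfm] at hmem
    simp at hmem
  | some u =>
    have hu : u.1 < 1000000 := lt_of_le_of_lt (pvFirstMin_le scores u hfm _ hmem) hplt
    rw [pvFoldS_char, hfm]
    simp only [hu, if_pos]
    have hhead : (PySem.List.sorted scores (fun t => t.1) false).head? = some u := by
      rw [pvHead_sorted, hfm]
    cases hs : PySem.List.sorted scores (fun t => t.1) false with
    | nil => rw [hs] at hhead; simp at hhead
    | cons a tl =>
      rw [hs] at hhead
      simp at hhead
      rw [hhead]
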